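-- pv_equiv track=rewrite | github.com/hoangle96/imagine_python | parse.py | parseToken
-- ===== SOURCE A (Python) =====
-- def parseToken(frl):
--     tokens = []
--     frll = frl.replace("\n", "").split(" ")
--     for i in frll:
--         if i == "cmt":
--             break
--         tokens.append(i)
--     return tokens
-- ===== SOURCE B (Python) =====
-- def parseToken(frl):
--     frll = frl.replace("\n", "").split(" ")
--     if "cmt" in frll:
--         return frll[:frll.index("cmt")]
--     return frll
-- ===== Notes on version B (the rewrite author's own statement) =====
-- stated objective: simpler
-- what changed: Replaces the element-by-element append-until-'cmt' loop with a find-boundary-then-slice decomposition: membership test plus index/slice, no accumulator loop.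
import Mathlib
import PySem

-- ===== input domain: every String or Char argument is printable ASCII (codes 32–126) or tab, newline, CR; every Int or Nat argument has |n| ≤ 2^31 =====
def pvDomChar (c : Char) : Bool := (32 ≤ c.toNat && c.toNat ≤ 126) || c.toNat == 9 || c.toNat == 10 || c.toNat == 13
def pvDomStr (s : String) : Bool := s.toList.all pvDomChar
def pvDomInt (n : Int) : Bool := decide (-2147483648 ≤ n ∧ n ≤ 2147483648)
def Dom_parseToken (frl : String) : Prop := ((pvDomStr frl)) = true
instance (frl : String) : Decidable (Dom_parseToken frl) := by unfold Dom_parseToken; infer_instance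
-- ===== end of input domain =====

-- B replaces A's append-until-'cmt' accumulator loop with a find-the-marker-then-slice decomposition (objective: simpler).

-- ===== PORT A =====
-- the for-loop with break: append each token until "cmt" is seen
def pvGoA : List String → List String
  | [] => []
  | x :: xs => if x == "cmt" then [] else x :: pvGoA xs

def parseToken (frl : String) : List String :=
  pvGoA ((PySem.Str.split? (PySem.Str.replace frl "\n" "") " ").getD [])

-- ===== PORT B =====
def parseToken_alt (frl : String) : List String :=
  let frll := (PySem.Str.split? (PySem.Str.replace frl "\n" "") " ").getD []
  if "cmt" ∈ frll then
    -- frll[:frll.index("cmt")] : slice to a nonnegative in-range bound = take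
    frll.take ((PySem.List.index? frll "cmt").getD 0)
  else frll

-- ===== PRECONDITION & SPEC =====
def Spec_parseToken (frl : String) (out : List String) : Prop := out = parseToken_alt frl
instance (frl : String) (out : List String) : Decidable (Spec_parseToken frl out) := by unfold Spec_parseToken; infer_instance

-- ===== CLAIM (what is proved, stated in full; the proofs are below) =====
def Claim_equal_parseToken : Prop := ∀ (frl : String), Dom_parseToken frl → Spec_parseToken frl (parseToken frl)

-- ===== LEMMAS AND PROOFS =====

theorem pvGoA_eq (l : List String) :
    pvGoA l = if "cmt" ∈ l then l.take ((PySem.List.index? l "cmt").getD 0) else l := by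
  induction l with
  | nil => simp [pvGoA]
  | cons x xs ih =>
    by_cases hx : x = "cmt"
    · subst hx
      rw [PySem.List.index?_cons_self]
      simp [pvGoA]
    · rw [PySem.List.index?_cons_of_ne xs hx]
      by_cases hm : "cmt" ∈ xs
      · have hs : (PySem.List.index? xs "cmt").isSome := by
          simpa [PySem.List.index?_isSome_iff] using hm
        obtain ⟨k, hk⟩ := Option.isSome_iff_exists.mp hs
        rw [PySem.List.index?_eq_idxOf?] at hk
        simp [pvGoA, hx, hm, ih, hk, Ne.symm hx]
      · simp [pvGoA, hx, hm, ih, Ne.symm hx]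

-- ===== VERDICT (by name: the statement is the Claim_ definition above) =====
theorem parseToken_spec : Claim_equal_parseToken := by
  intro frl _
  unfold Spec_parseToken parseToken parseToken_alt
  exact pvGoA_eq _
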